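-- pv_equiv track=rewrite | github.com/SINHOLEE/Algorithm | 카카오페스티벌/요기요 코테/요기요_전화번호.py | solution
-- ===== SOURCE A (Python) =====
-- def solution(S):
--     S = S.strip().replace('-','').replace(' ','')
--     ans = ''
--     if len(S) % 3 == 0 or len(S) % 3 == 2:
--         for j in range(len(S)):
--             ans += S[j]
--             if j % 3 == 2 and j < len(S)-1:
--                 ans += '-'
--     else:
--         for j in range(len(S)):
--             ans += S[j]
--             if j % 3 == 2 and j < len(S) - 2:
--                 ans += '-'
--             if j == len(S) - 3:
--                 ans += '-'
--
--     return ans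
-- ===== SOURCE B (Python) =====
-- def solution(S):
--     S = S.strip().replace('-', '').replace(' ', '')
--     n = len(S)
--     if n % 3 == 1 and n >= 4:
--         groups = [S[i:i + 3] for i in range(0, n - 4, 3)] + [S[n - 4:n - 2], S[n - 2:]]
--     else:
--         groups = [S[i:i + 3] for i in range(0, n, 3)]
--     return '-'.join(groups)
-- ===== Notes on version B (the rewrite author's own statement) =====
-- stated objective: simpler
-- what changed: Instead of A's per-character loop that appends each character and tests whether a dash must follow it, B slices the preprocessed string directly into group substrings (step-3 slices, with an explicit 2+2 tail split when the length is congruent 1 mod 3 and at least 4) and joins the groups with the dash separator.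
import Mathlib
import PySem

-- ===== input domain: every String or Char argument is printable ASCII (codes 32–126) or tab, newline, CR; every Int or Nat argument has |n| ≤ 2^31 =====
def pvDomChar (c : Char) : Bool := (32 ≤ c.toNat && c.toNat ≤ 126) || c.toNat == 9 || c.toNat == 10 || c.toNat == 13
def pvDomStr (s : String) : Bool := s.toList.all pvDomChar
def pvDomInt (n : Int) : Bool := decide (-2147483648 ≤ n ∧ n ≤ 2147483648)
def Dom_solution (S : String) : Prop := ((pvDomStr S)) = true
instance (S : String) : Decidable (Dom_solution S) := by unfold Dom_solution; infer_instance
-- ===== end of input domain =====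

-- B replaces A's per-character loop with dash-emission tests by slicing the preprocessed
-- string directly into group substrings and joining them (objective: simpler; measured faster).

-- ===== PORT A =====
-- the two character loops of A, on the preprocessed character list
def solutionBody (t : List Char) : List Char :=
  if PySem.Int.mod (t.length : Int) 3 == 0 || PySem.Int.mod (t.length : Int) 3 == 2 then
    (PySem.List.pyRange 0 (t.length : Int) 1).foldl
      (fun ans j =>
        if PySem.Int.mod j 3 == 2 && decide (j < (t.length : Int) - 1) then
          (ans ++ [PySem.List.pyGetD t j ' ']) ++ ['-']
        else ans ++ [PySem.List.pyGetD t j ' ']) []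
  else
    (PySem.List.pyRange 0 (t.length : Int) 1).foldl
      (fun ans j =>
        if j == (t.length : Int) - 3 then
          (if PySem.Int.mod j 3 == 2 && decide (j < (t.length : Int) - 2) then
            (ans ++ [PySem.List.pyGetD t j ' ']) ++ ['-']
          else ans ++ [PySem.List.pyGetD t j ' ']) ++ ['-']
        else
          (if PySem.Int.mod j 3 == 2 && decide (j < (t.length : Int) - 2) then
            (ans ++ [PySem.List.pyGetD t j ' ']) ++ ['-']
          else ans ++ [PySem.List.pyGetD t j ' '])) []

def solution (S : String) : String :=
  String.ofList (solutionBody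
    (PySem.Str.replace (PySem.Str.replace (PySem.Str.strip S) "-" "") " " "").toList)

-- ===== PORT B =====
-- the `groups` list of B: step-3 slices, with the 2+2 tail split when len % 3 == 1 and len >= 4
def altGroups (t : List Char) : List (List Char) :=
  if PySem.Int.mod (t.length : Int) 3 == 1 && decide (4 ≤ (t.length : Int)) then
    (PySem.List.pyRange 0 ((t.length : Int) - 4) 3).map
      (fun i => PySem.List.slice t (some i) (some (i + 3)))
      ++ [PySem.List.slice t (some ((t.length : Int) - 4)) (some ((t.length : Int) - 2)),
          PySem.List.slice t (some ((t.length : Int) - 2)) none]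
  else
    (PySem.List.pyRange 0 (t.length : Int) 3).map
      (fun i => PySem.List.slice t (some i) (some (i + 3)))

def solution_alt (S : String) : String :=
  String.ofList (PySem.Chars.join ['-'] (altGroups
    (PySem.Str.replace (PySem.Str.replace (PySem.Str.strip S) "-" "") " " "").toList))

-- ===== PRECONDITION & SPEC =====
def Spec_solution (S : String) (out : String) : Prop := out = solution_alt S
instance (S : String) (out : String) : Decidable (Spec_solution S out) := by unfold Spec_solution; infer_instance

-- ===== CLAIM (what is proved, stated in full; the proofs are below) =====
def Claim_equal_solution : Prop := ∀ (S : String), Dom_solution S → Spec_solution S (solution S)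

-- ===== LEMMAS AND PROOFS =====

-- the characters A's loop emits at index j
def emitA (t : List Char) (j : Int) : List Char :=
  if PySem.Int.mod (t.length : Int) 3 == 0 || PySem.Int.mod (t.length : Int) 3 == 2 then
    PySem.List.pyGetD t j ' ' ::
      (if PySem.Int.mod j 3 == 2 && decide (j < (t.length : Int) - 1) then ['-'] else [])
  else
    PySem.List.pyGetD t j ' ' ::
      ((if PySem.Int.mod j 3 == 2 && decide (j < (t.length : Int) - 2) then ['-'] else []) ++
       (if j == (t.length : Int) - 3 then ['-'] else []))

-- A's fold is the flatMap of its per-index emissions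
theorem bodyA_flat (t : List Char) :
    solutionBody t = (PySem.List.pyRange 0 (t.length : Int) 1).flatMap (emitA t) := by
  unfold solutionBody
  by_cases hb : (PySem.Int.mod (t.length : Int) 3 == 0 || PySem.Int.mod (t.length : Int) 3 == 2) = true
  · rw [if_pos hb]
    have hf : (fun (ans : List Char) (j : Int) =>
        if PySem.Int.mod j 3 == 2 && decide (j < (t.length : Int) - 1) then
          (ans ++ [PySem.List.pyGetD t j ' ']) ++ ['-']
        else ans ++ [PySem.List.pyGetD t j ' ']) = fun ans j => ans ++ emitA t j := by
      funext ans j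
      simp only [emitA, if_pos hb]
      split_ifs <;> simp
    rw [hf, PySem.List.foldl_append_eq_flatMap]
    simp
  · rw [if_neg hb]
    have hf : (fun (ans : List Char) (j : Int) =>
        if j == (t.length : Int) - 3 then
          (if PySem.Int.mod j 3 == 2 && decide (j < (t.length : Int) - 2) then
            (ans ++ [PySem.List.pyGetD t j ' ']) ++ ['-']
          else ans ++ [PySem.List.pyGetD t j ' ']) ++ ['-']
        else
          (if PySem.Int.mod j 3 == 2 && decide (j < (t.length : Int) - 2) then
            (ans ++ [PySem.List.pyGetD t j ' ']) ++ ['-']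
          else ans ++ [PySem.List.pyGetD t j ' '])) = fun ans j => ans ++ emitA t j := by
      funext ans j
      simp only [emitA, if_neg hb]
      split_ifs <;> simp
    rw [hf, PySem.List.foldl_append_eq_flatMap]
    simp

-- shifting A's emission three places left drops the first group of three
theorem emitA_shift (x y z : Char) (r : List Char) (k : Nat) :
    emitA (x :: y :: z :: r) (3 + (k : Int)) = emitA r (k : Int) := by
  have hlen : (((x :: y :: z :: r).length : Int)) = (r.length : Int) + 3 := by
    simp [List.length_cons]; ring
  have e0 : PySem.Int.mod ((r.length : Int) + 3) 3 = PySem.Int.mod (r.length : Int) 3 := by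
    rw [PySem.Int.mod_eq_emod_of_pos (by norm_num), PySem.Int.mod_eq_emod_of_pos (by norm_num)]
    omega
  have eg : PySem.List.pyGetD (x :: y :: z :: r) (3 + (k : Int)) ' ' = PySem.List.pyGetD r (k : Int) ' ' := by
    rw [show (3 + (k : Int)) = ((k + 3 : Nat) : Int) by push_cast; ring,
        PySem.List.pyGetD_natCast, PySem.List.pyGetD_natCast,
        show k + 3 = ((k + 2) + 1) from rfl, List.getD_cons_succ,
        show k + 2 = ((k + 1) + 1) from rfl, List.getD_cons_succ,
        List.getD_cons_succ]
  have e1 : PySem.Int.mod (3 + (k : Int)) 3 = PySem.Int.mod (k : Int) 3 := by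
    rw [PySem.Int.mod_eq_emod_of_pos (by norm_num), PySem.Int.mod_eq_emod_of_pos (by norm_num)]
    omega
  have e2 : (decide (3 + (k : Int) < ((r.length : Int) + 3) - 1)) = decide ((k : Int) < (r.length : Int) - 1) := by
    simp only [decide_eq_decide]; omega
  have e3 : (decide (3 + (k : Int) < ((r.length : Int) + 3) - 2)) = decide ((k : Int) < (r.length : Int) - 2) := by
    simp only [decide_eq_decide]; omega
  have e4 : ((3 + (k : Int)) == ((r.length : Int) + 3) - 3) = ((k : Int) == (r.length : Int) - 3) := by
    rw [Bool.eq_iff_iff]; simp only [beq_iff_eq]; omega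
  simp only [emitA, hlen, e0, eg, e1, e2, e3, e4]

-- peel one group of three off A's emission stream (length ≥ 5)
theorem flatA_peel (x y z : Char) (r : List Char) (hr : 2 ≤ r.length) :
    (PySem.List.pyRange 0 (((x :: y :: z :: r).length : Int)) 1).flatMap (emitA (x :: y :: z :: r)) =
      x :: y :: z :: '-' :: (PySem.List.pyRange 0 ((r.length : Int)) 1).flatMap (emitA r) := by
  have hlen : (((x :: y :: z :: r).length : Int)) = (r.length : Int) + 3 := by
    simp [List.length_cons]; ring
  have g0 : PySem.List.pyGetD (x :: y :: z :: r) 0 ' ' = x := by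
    rw [show (0 : Int) = ((0 : Nat) : Int) from rfl, PySem.List.pyGetD_natCast]; rfl
  have g1 : PySem.List.pyGetD (x :: y :: z :: r) 1 ' ' = y := by
    rw [show (1 : Int) = ((1 : Nat) : Int) from rfl, PySem.List.pyGetD_natCast]; rfl
  have g2 : PySem.List.pyGetD (x :: y :: z :: r) 2 ' ' = z := by
    rw [show (2 : Int) = ((2 : Nat) : Int) from rfl, PySem.List.pyGetD_natCast]; rfl
  have htail : (PySem.List.pyRange 3 ((r.length : Int) + 3) 1).flatMap (emitA (x :: y :: z :: r)) =
      (PySem.List.pyRange 0 ((r.length : Int)) 1).flatMap (emitA r) := by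
    rw [PySem.List.pyRange_one 3 _, PySem.List.pyRange_one 0 _,
        show ((r.length : Int) + 3 - 3).toNat = r.length by omega,
        show ((r.length : Int) - 0).toNat = r.length by omega,
        List.flatMap_map, List.flatMap_map]
    simp only [List.flatMap_def]
    congr 1
    exact List.map_congr_left (fun k _ => by rw [emitA_shift, zero_add])
  rw [hlen, PySem.List.pyRange_one_append 0 3 ((r.length : Int) + 3) (by norm_num) (by omega),
      List.flatMap_append, htail,
      show PySem.List.pyRange 0 3 1 = [0, 1, 2] from by decide]
  by_cases hb : (PySem.Int.mod ((r.length : Int) + 3) 3 == 0 || PySem.Int.mod ((r.length : Int) + 3) 3 == 2) = true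
  · have h0 : emitA (x :: y :: z :: r) 0 = [x] := by
      simp only [emitA, hlen]; rw [if_pos hb]; simp [g0]
    have h1 : emitA (x :: y :: z :: r) 1 = [y] := by
      simp only [emitA, hlen]; rw [if_pos hb]; simp [g1]
    have h2 : emitA (x :: y :: z :: r) 2 = [z, '-'] := by
      simp only [emitA, hlen]; rw [if_pos hb]; simp [g2]
      exact List.ne_nil_of_length_pos (by omega)
    simp [h0, h1, h2]
  · have hb' := hb
    have hm4 : 4 ≤ r.length := by
      simp only [Bool.or_eq_true, not_or, beq_iff_eq] at hb'
      obtain ⟨hb0, hb2⟩ := hb'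
      rw [PySem.Int.mod_eq_emod_of_pos (by norm_num)] at hb0 hb2
      omega
    have h0 : emitA (x :: y :: z :: r) 0 = [x] := by
      simp only [emitA, hlen]; rw [if_neg hb]; simp [g0]; omega
    have h1 : emitA (x :: y :: z :: r) 1 = [y] := by
      simp only [emitA, hlen]; rw [if_neg hb]; simp [g1]; omega
    have h2 : emitA (x :: y :: z :: r) 2 = [z, '-'] := by
      simp only [emitA, hlen]; rw [if_neg hb]
      simp [g2, show ((2:Int) < (r.length : Int) + 3 - 2) from by omega,
            show ¬((2:Int) = (r.length : Int)) from by omega]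
    simp [h0, h1, h2]

-- the intended grouping: blocks of three, with a 2+2 tail when 4 characters remain
def groupsSpec : List Char → List (List Char)
  | [] => []
  | [x] => [[x]]
  | [x, y] => [[x, y]]
  | [x, y, z] => [[x, y, z]]
  | [x, y, z, w] => [[x, y], [z, w]]
  | x :: y :: z :: w :: v :: r => [x, y, z] :: groupsSpec (w :: v :: r)

theorem groupsSpec_ne_nil (t : List Char) (ht : t ≠ []) : groupsSpec t ≠ [] := by
  match t with
  | [] => exact absurd rfl ht
  | [x] => simp [groupsSpec]
  | [x, y] => simp [groupsSpec]
  | [x, y, z] => simp [groupsSpec]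
  | [x, y, z, w] => simp [groupsSpec]
  | x :: y :: z :: w :: v :: r => simp [groupsSpec]

-- shift a step-3 slice three places into the list
theorem slice_shift (x y z : Char) (l : List Char) (i : Nat) :
    PySem.List.slice (x :: y :: z :: l) (some (3 + 3 * (i : Int))) (some (3 + 3 * (i : Int) + 3)) =
      PySem.List.slice l (some (3 * (i : Int))) (some (3 * (i : Int) + 3)) := by
  rw [show (3 + 3 * (i : Int)) = ((3 + 3 * i : Nat) : Int) by push_cast; ring,
      show ((3 + 3 * i : Nat) : Int) + 3 = ((3 + 3 * i : Nat) : Int) + ((3 : Nat) : Int) by norm_num,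
      PySem.List.slice_natCast_add,
      show (3 * (i : Int)) = ((3 * i : Nat) : Int) by push_cast; ring,
      show ((3 * i : Nat) : Int) + 3 = ((3 * i : Nat) : Int) + ((3 : Nat) : Int) by norm_num,
      PySem.List.slice_natCast_add]
  congr 1
  rw [show 3 + 3 * i = 3 * i + 3 from by omega,
      show 3 * i + 3 = ((3 * i + 2) + 1) from rfl, List.drop_succ_cons,
      show 3 * i + 2 = ((3 * i + 1) + 1) from rfl, List.drop_succ_cons,
      List.drop_succ_cons]

-- peel one group of three off B's group list (length ≥ 5)
theorem peelB (x y z w v : Char) (r : List Char) :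
    altGroups (x :: y :: z :: w :: v :: r) = [x, y, z] :: altGroups (w :: v :: r) := by
  have hl1 : (((x :: y :: z :: w :: v :: r) : List Char).length : Int) = (r.length : Int) + 5 := by
    simp [List.length_cons]; ring
  have hl2 : (((w :: v :: r) : List Char).length : Int) = (r.length : Int) + 2 := by
    simp [List.length_cons]; ring
  have hshift : ∀ k : Nat,
      PySem.List.slice (x :: y :: z :: w :: v :: r)
        (some (0 + 3 * ((k + 1 : Nat) : Int))) (some (0 + 3 * ((k + 1 : Nat) : Int) + 3)) =
      PySem.List.slice (w :: v :: r)
        (some (0 + 3 * ((k : Nat) : Int))) (some (0 + 3 * ((k : Nat) : Int) + 3)) := by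
    intro k
    rw [show (0 + 3 * ((k + 1 : Nat) : Int)) = 3 + 3 * (k : Int) by push_cast; ring,
        show (3 + 3 * (k : Int) + 3) = 3 + 3 * (k : Int) + 3 from rfl,
        show (0 + 3 * ((k : Nat) : Int)) = 3 * (k : Int) by ring]
    exact slice_shift x y z (w :: v :: r) k
  by_cases hc : (r.length + 2) % 3 = 1
  · have hm2 : 2 ≤ r.length := by omega
    have hT : (PySem.Int.mod ((r.length : Int) + 5) 3 == 1 && decide ((4:Int) ≤ (r.length : Int) + 5)) = true := by
      rw [PySem.Int.mod_eq_emod_of_pos (by norm_num)]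
      simp only [Bool.and_eq_true, beq_iff_eq, decide_eq_true_eq]
      omega
    have hR : (PySem.Int.mod ((r.length : Int) + 2) 3 == 1 && decide ((4:Int) ≤ (r.length : Int) + 2)) = true := by
      rw [PySem.Int.mod_eq_emod_of_pos (by norm_num)]
      simp only [Bool.and_eq_true, beq_iff_eq, decide_eq_true_eq]
      omega
    have hmap : (PySem.List.pyRange 0 ((r.length : Int) + 5 - 4) 3).map
          (fun i => PySem.List.slice (x :: y :: z :: w :: v :: r) (some i) (some (i + 3)))
        = [x, y, z] :: (PySem.List.pyRange 0 ((r.length : Int) + 2 - 4) 3).map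
          (fun i => PySem.List.slice (w :: v :: r) (some i) (some (i + 3))) := by
      rw [show (r.length : Int) + 5 - 4 = (r.length : Int) + 1 by ring,
          show (r.length : Int) + 2 - 4 = (r.length : Int) - 2 by ring,
          PySem.List.pyRange_of_pos 0 ((r.length : Int) + 1) (by norm_num),
          PySem.List.pyRange_of_pos 0 ((r.length : Int) - 2) (by norm_num),
          show (if (0:Int) < (r.length : Int) + 1 then (((r.length : Int) + 1 - 0 + 3 - 1) / 3).toNat else 0)
              = r.length / 3 + 1 by rw [if_pos (by omega)]; omega,
          show (if (0:Int) < (r.length : Int) - 2 then (((r.length : Int) - 2 - 0 + 3 - 1) / 3).toNat else 0)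
              = r.length / 3 by split_ifs <;> omega,
          List.range_succ_eq_map]
      simp only [List.map_cons, List.map_map]
      congr 1
      refine List.map_congr_left (fun k _ => ?_)
      simp only [Function.comp_apply]
      exact hshift k
    have hs1 : PySem.List.slice (x :: y :: z :: w :: v :: r)
          (some ((r.length : Int) + 5 - 4)) (some ((r.length : Int) + 5 - 2))
        = PySem.List.slice (w :: v :: r)
          (some ((r.length : Int) + 2 - 4)) (some ((r.length : Int) + 2 - 2)) := by
      rw [PySem.List.slice_toNat _ (by omega) (by omega), PySem.List.slice_toNat _ (by omega) (by omega),
          show ((r.length : Int) + 5 - 4).toNat = r.length + 1 by omega,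
          show ((r.length : Int) + 5 - 2).toNat = r.length + 3 by omega,
          show ((r.length : Int) + 2 - 4).toNat = r.length - 2 by omega,
          show ((r.length : Int) + 2 - 2).toNat = r.length by omega,
          show r.length + 3 - (r.length + 1) = 2 by omega,
          show r.length - (r.length - 2) = 2 by omega]
      congr 1
      rw [show r.length + 1 = 3 + (r.length - 2) by omega, ← List.drop_drop]
      rfl
    have hs2 : PySem.List.slice (x :: y :: z :: w :: v :: r) (some ((r.length : Int) + 5 - 2)) none
        = PySem.List.slice (w :: v :: r) (some ((r.length : Int) + 2 - 2)) none := by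
      rw [PySem.List.slice_from _ (by omega), PySem.List.slice_from _ (by omega),
          show ((r.length : Int) + 5 - 2).toNat = r.length + 3 by omega,
          show ((r.length : Int) + 2 - 2).toNat = r.length by omega,
          show r.length + 3 = 3 + r.length by omega, ← List.drop_drop]
      rfl
    simp only [altGroups, hl1, hl2]
    rw [if_pos hT, if_pos hR, hmap, hs1, hs2]
    simp
  · have hT : (PySem.Int.mod ((r.length : Int) + 5) 3 == 1 && decide ((4:Int) ≤ (r.length : Int) + 5)) = false := by
      rw [PySem.Int.mod_eq_emod_of_pos (by norm_num)]
      simp only [Bool.and_eq_false_iff, beq_eq_false_iff_ne, ne_eq, decide_eq_false_iff_not, not_le]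
      left; omega
    have hR : (PySem.Int.mod ((r.length : Int) + 2) 3 == 1 && decide ((4:Int) ≤ (r.length : Int) + 2)) = false := by
      rw [PySem.Int.mod_eq_emod_of_pos (by norm_num)]
      simp only [Bool.and_eq_false_iff, beq_eq_false_iff_ne, ne_eq, decide_eq_false_iff_not, not_le]
      left; omega
    have hmap : (PySem.List.pyRange 0 ((r.length : Int) + 5) 3).map
          (fun i => PySem.List.slice (x :: y :: z :: w :: v :: r) (some i) (some (i + 3)))
        = [x, y, z] :: (PySem.List.pyRange 0 ((r.length : Int) + 2) 3).map
          (fun i => PySem.List.slice (w :: v :: r) (some i) (some (i + 3))) := by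
      rw [PySem.List.pyRange_of_pos 0 ((r.length : Int) + 5) (by norm_num),
          PySem.List.pyRange_of_pos 0 ((r.length : Int) + 2) (by norm_num),
          show (if (0:Int) < (r.length : Int) + 5 then (((r.length : Int) + 5 - 0 + 3 - 1) / 3).toNat else 0)
              = (r.length + 4) / 3 + 1 by rw [if_pos (by omega)]; omega,
          show (if (0:Int) < (r.length : Int) + 2 then (((r.length : Int) + 2 - 0 + 3 - 1) / 3).toNat else 0)
              = (r.length + 4) / 3 by rw [if_pos (by omega)]; omega,
          List.range_succ_eq_map]
      simp only [List.map_cons, List.map_map]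
      congr 1
      refine List.map_congr_left (fun k _ => ?_)
      simp only [Function.comp_apply]
      exact hshift k
    simp only [altGroups, hl1, hl2]
    rw [if_neg (by rw [hT]; simp), if_neg (by rw [hR]; simp), hmap]
-- B's groups are the intended grouping
theorem altGroups_eq (t : List Char) : altGroups t = groupsSpec t := by
  induction t using groupsSpec.induct with
  | case1 =>
    simp only [altGroups]
    rw [show ((([] : List Char)).length : Int) = 0 from rfl,
        show PySem.List.pyRange 0 (0:Int) 3 = [] from by decide]
    rfl
  | case2 x =>
    simp only [altGroups]
    rw [show (([x] : List Char).length : Int) = 1 from rfl,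
        show PySem.List.pyRange 0 (1:Int) 3 = [0] from by decide]
    rfl
  | case3 x y =>
    simp only [altGroups]
    rw [show (([x, y] : List Char).length : Int) = 2 from rfl,
        show PySem.List.pyRange 0 (2:Int) 3 = [0] from by decide]
    rfl
  | case4 x y z =>
    simp only [altGroups]
    rw [show (([x, y, z] : List Char).length : Int) = 3 from rfl,
        show PySem.List.pyRange 0 (3:Int) 3 = [0] from by decide]
    rfl
  | case5 x y z w =>
    simp only [altGroups]
    rw [show (([x, y, z, w] : List Char).length : Int) = 4 from rfl,
        show PySem.List.pyRange 0 ((4:Int) - 4) 3 = [] from by decide]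
    rfl
  | case6 x y z w v r ih =>
    rw [peelB, ih]
    rfl

-- A's emitted characters are the dash-join of the intended grouping
theorem bodyA_eq (t : List Char) :
    solutionBody t = PySem.Chars.join ['-'] (groupsSpec t) := by
  induction t using groupsSpec.induct with
  | case1 =>
    simp only [solutionBody]
    rw [show ((([] : List Char)).length : Int) = 0 from rfl,
        show PySem.List.pyRange 0 (0:Int) 1 = [] from by decide]
    rfl
  | case2 x =>
    simp only [solutionBody]
    rw [show (([x] : List Char).length : Int) = 1 from rfl,
        show PySem.List.pyRange 0 (1:Int) 1 = [0] from by decide]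
    rfl
  | case3 x y =>
    simp only [solutionBody]
    rw [show (([x, y] : List Char).length : Int) = 2 from rfl,
        show PySem.List.pyRange 0 (2:Int) 1 = [0, 1] from by decide]
    rfl
  | case4 x y z =>
    simp only [solutionBody]
    rw [show (([x, y, z] : List Char).length : Int) = 3 from rfl,
        show PySem.List.pyRange 0 (3:Int) 1 = [0, 1, 2] from by decide]
    rfl
  | case5 x y z w =>
    simp only [solutionBody]
    rw [show (([x, y, z, w] : List Char).length : Int) = 4 from rfl,
        show PySem.List.pyRange 0 (4:Int) 1 = [0, 1, 2, 3] from by decide]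
    rfl
  | case6 x y z w v r ih =>
    obtain ⟨g, gs, hg⟩ : ∃ g gs, groupsSpec (w :: v :: r) = g :: gs := by
      cases h : groupsSpec (w :: v :: r) with
      | nil => exact absurd h (groupsSpec_ne_nil _ (by simp))
      | cons g gs => exact ⟨g, gs, rfl⟩
    rw [bodyA_flat, flatA_peel x y z (w :: v :: r) (by simp), ← bodyA_flat, ih,
        show groupsSpec (x :: y :: z :: w :: v :: r) = [x, y, z] :: groupsSpec (w :: v :: r) from rfl,
        hg, PySem.Chars.join_cons_cons]
    simp

-- ===== VERDICT (by name: the statement is the Claim_ definition above) =====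
theorem solution_spec : Claim_equal_solution := by
  intro S _
  unfold Spec_solution solution solution_alt
  rw [bodyA_eq, ← altGroups_eq]
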